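-- pv_equiv track=rewrite | github.com/Littlestar0508/programmers-algorithm | YJ/지게차와크레인.py | solution
-- ===== SOURCE A (Python) =====
-- def solution(storage, requests):
--     from collections import deque
--     from copy import deepcopy
--     answer = 0
--     move = [(0, 1), (1, 0), (0, -1), (-1, 0)]
--     temp = [['' for i in range(len(storage[0]) + 2)]]
--     for s in storage:
--         temp.append([''] + list(map(str, s)) + [''])
--     temp.append(['' for i in range(len(storage[0]) + 2)])
--
--     def out_of_bound(x, y):
--         if 0 <= x < len(temp) and 0 <= y < len(temp[0]):
--             return False
--         else:
--             return True
--
--     visit = [[0 for i in range(len(temp[0]))] for j in range(len(temp))]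
--
--     for req in requests:
--         if len(req) == 1:
--             lst = set()
--             q = deque()
--             q.append((0, 0))
--             v = deepcopy(visit)
--             v[0][0] = 1
--             while q:
--                 sx, sy = q.popleft()
--                 for dx, dy in move:
--                     nx, ny = sx + dx, sy + dy
--                     if not out_of_bound(nx, ny) and temp[nx][ny] == req:
--                         lst.add((nx, ny))
--                     elif not out_of_bound(nx, ny) and v[nx][ny] == 0 and temp[nx][ny] == '':
--                         q.append((nx, ny))
--                         v[nx][ny] = 1
--             for i, j in lst:
--                 temp[i][j] = ''
--
--         else:
--             for i in range(len(temp)):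
--                 for j in range(len(temp[0])):
--                     if temp[i][j] == req[0]:
--                         temp[i][j] = ''
--
--     for i in range(len(temp)):
--         for j in range(len(temp[0])):
--             if temp[i][j] != '':
--                 answer += 1
--
--
--     return answer
-- ===== SOURCE B (Python) =====
-- def solution(storage, requests):
--     h, w = len(storage) + 2, len(storage[0]) + 2
--     # occupied cells only, keyed by (row, col) in the bordered coordinate system
--     grid = {}
--     for i, s in enumerate(storage):
--         for j, ch in enumerate(s):
--             grid[(i + 1, j + 1)] = ch
--     for req in requests:
--         if len(req) == 1:
--             # round-based flood fill of the outside-connected empty region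
--             reach = {(0, 0)}
--             while True:
--                 adds = {(nx, ny)
--                         for (x, y) in reach
--                         for (nx, ny) in ((x, y + 1), (x + 1, y), (x, y - 1), (x - 1, y))
--                         if 0 <= nx < h and 0 <= ny < w
--                         and (nx, ny) not in grid and (nx, ny) not in reach}
--                 if not adds:
--                     break
--                 reach |= adds
--             removed = {(nx, ny)
--                        for (x, y) in reach
--                        for (nx, ny) in ((x, y + 1), (x + 1, y), (x, y - 1), (x - 1, y))
--                        if grid.get((nx, ny)) == req}
--             for p in removed:
--                 del grid[p]
--         else:
--             c = req[0]
--             grid = {k: v for k, v in grid.items() if v != c}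
--     return len(grid)
-- ===== Notes on version B (the rewrite author's own statement) =====
-- stated objective: alternative
-- what changed: B stores only the occupied cells in a dict keyed by position and, per single-item request, computes the outside-connected empty region by a round-based flood-fill fixpoint instead of A's deque BFS over a freshly deep-copied visited matrix; crane requests become a dict filter and the final count is len(dict) instead of A's full-grid double loop.
-- outside the precondition, e.g. on solution(['A', 'BBB'], []): A returns 3, B returns 4; on solution(['A', 'BBB'], ['B']): A returns 1, B returns 2
import Mathlib
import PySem

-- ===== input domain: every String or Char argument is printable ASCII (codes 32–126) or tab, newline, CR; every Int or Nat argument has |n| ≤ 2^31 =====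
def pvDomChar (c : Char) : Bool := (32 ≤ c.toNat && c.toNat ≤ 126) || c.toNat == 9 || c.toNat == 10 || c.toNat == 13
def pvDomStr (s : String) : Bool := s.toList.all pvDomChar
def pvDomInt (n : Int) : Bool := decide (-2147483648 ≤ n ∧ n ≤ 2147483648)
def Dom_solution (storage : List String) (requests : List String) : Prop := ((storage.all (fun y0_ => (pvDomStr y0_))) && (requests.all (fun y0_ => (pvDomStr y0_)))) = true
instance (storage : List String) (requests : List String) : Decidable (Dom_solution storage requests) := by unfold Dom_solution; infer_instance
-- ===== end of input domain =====

-- B replaces A's per-request BFS over a visited matrix by a round-based flood-fill fixpoint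
-- over a dict that stores only the occupied cells (count = len(dict)); objective: alternative.

-- ===== PORT A =====
def aMoves : List (Int × Int) := [(0,1),(1,0),(0,-1),(-1,0)]

def aOob (t : List (List String)) (x y : Int) : Bool :=
  !(decide (0 ≤ x) && decide (x < (t.length : Int)) && decide (0 ≤ y) && decide (y < ((t.headD []).length : Int)))

-- temp[x][y]; used only under the in-bounds guard the Python performs, where toNat is exact
def aCell (t : List (List String)) (x y : Int) : String :=
  (t.getD x.toNat []).getD y.toNat ""

def aCellSet (t : List (List String)) (x y : Int) (s : String) : List (List String) :=
  t.set x.toNat ((t.getD x.toNat []).set y.toNat s)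

def aVGet (v : List (List Int)) (x y : Int) : Int := (v.getD x.toNat []).getD y.toNat 0

def aVSet (v : List (List Int)) (x y : Int) : List (List Int) :=
  v.set x.toNat ((v.getD x.toNat []).set y.toNat 1)

-- the `while q:` BFS loop; fuel len(temp)*len(temp[0])+1 is proven sufficient below
def aBfs (t : List (List String)) (req : String) :
    Nat → List (Int × Int) → List (List Int) → PySem.Set (Int × Int) → PySem.Set (Int × Int)
  | 0, _, _, lst => lst
  | fuel + 1, q, v, lst =>
    match q with
    | [] => lst
    | (sx, sy) :: qr =>
      let st := aMoves.foldl
        (fun (st : List (Int × Int) × List (List Int) × PySem.Set (Int × Int)) d =>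
          let nx := sx + d.1
          let ny := sy + d.2
          if aOob t nx ny = false ∧ aCell t nx ny = req then
            (st.1, st.2.1, PySem.Set.add st.2.2 (nx, ny))
          else if aOob t nx ny = false ∧ aVGet st.2.1 nx ny = 0 ∧ aCell t nx ny = "" then
            (st.1 ++ [(nx, ny)], aVSet st.2.1 nx ny, st.2.2)
          else st)
        (qr, v, lst)
      aBfs t req fuel st.1 st.2.1 st.2.2

-- one iteration of the `for req in requests` loop
def aStep (t : List (List String)) (req : String) : List (List String) :=
  if PySem.Str.len req = 1 then
    let visit := List.replicate t.length (List.replicate (t.headD []).length (0 : Int))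
    let v := aVSet visit 0 0                       -- v = deepcopy(visit); v[0][0] = 1
    let lst := aBfs t req (t.length * (t.headD []).length + 1) [(0, 0)] v PySem.Set.empty
    lst.foldl (fun t p => aCellSet t p.1 p.2 "") t -- `for i, j in lst:` (result is order-independent)
  else
    let c := String.singleton ((PySem.Str.pyGet? req 0).getD ' ')  -- req[0]; Pre_ keeps every request nonempty, so pyGet? is some
    (PySem.List.pyRange 0 (t.length : Int) 1).foldl (fun t i =>
      (PySem.List.pyRange 0 ((t.headD []).length : Int) 1).foldl (fun t j =>
        if aCell t i j = c then aCellSet t i j "" else t) t) t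

def solution (storage : List String) (requests : List String) : Int :=
  -- len(storage[0]): Pre_ keeps storage nonempty, so headD is exact
  let temp : List (List String) :=
    [List.replicate ((storage.headD "").toList.length + 2) ""]
      ++ storage.map (fun s => [""] ++ s.toList.map (fun ch => String.singleton ch) ++ [""])
      ++ [List.replicate ((storage.headD "").toList.length + 2) ""]
  let tF := requests.foldl aStep temp
  (PySem.List.pyRange 0 (tF.length : Int) 1).foldl (fun a i =>
    (PySem.List.pyRange 0 ((tF.headD []).length : Int) 1).foldl (fun a j =>
      if aCell tF i j ≠ "" then a + 1 else a) a) 0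

-- ===== PORT B =====
def bNbrs (p : Int × Int) : List (Int × Int) :=
  [(p.1, p.2 + 1), (p.1 + 1, p.2), (p.1, p.2 - 1), (p.1 - 1, p.2)]

def bInb (h w : Int) (p : Int × Int) : Bool :=
  decide (0 ≤ p.1) && decide (p.1 < h) && decide (0 ≤ p.2) && decide (p.2 < w)

-- the `while True:` fixpoint loop; fuel (h*w).toNat+1 is proven sufficient below
def bFlood (g : PySem.Dict (Int × Int) String) (h w : Int) :
    Nat → PySem.Set (Int × Int) → PySem.Set (Int × Int)
  | 0, reach => reach
  | fuel + 1, reach =>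
    let adds : PySem.Set (Int × Int) :=
      reach.foldl (fun a p =>
        (bNbrs p).foldl (fun a n =>
          if bInb h w n = true ∧ g.get? n = none ∧ ¬ n ∈ reach then PySem.Set.add a n else a) a)
        PySem.Set.empty
    if adds = [] then reach
    else bFlood g h w fuel (PySem.Set.union reach adds)

def bStep (h w : Int) (g : PySem.Dict (Int × Int) String) (req : String) :
    PySem.Dict (Int × Int) String :=
  if PySem.Str.len req = 1 then
    let reach := bFlood g h w ((h * w).toNat + 1) (PySem.Set.ofList [(0, 0)])
    let removed : PySem.Set (Int × Int) :=
      reach.foldl (fun r p =>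
        (bNbrs p).foldl (fun r n => if g.get? n = some req then PySem.Set.add r n else r) r)
        PySem.Set.empty
    removed.foldl (fun g p => g.erase p) g         -- `for p in removed: del grid[p]` (order-independent)
  else
    let c := String.singleton ((PySem.Str.pyGet? req 0).getD ' ')  -- req[0]; Pre_ keeps every request nonempty, so pyGet? is some
    PySem.Dict.mk (g.items.filter (fun kv => kv.2 ≠ c))

def solution_alt (storage : List String) (requests : List String) : Int :=
  let h : Int := storage.length + 2
  let w : Int := (storage.headD "").toList.length + 2
  let g0 : PySem.Dict (Int × Int) String :=
    (PySem.List.enumerate storage 0).foldl (fun g is =>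
      (PySem.List.enumerate is.2.toList 0).foldl (fun g jc =>
        g.insert (is.1 + 1, jc.1 + 1) (String.singleton jc.2)) g) PySem.Dict.empty
  ((requests.foldl (bStep h w) g0).size : Int)

-- ===== PRECONDITION & SPEC =====
-- Pre_ excludes inputs on which A raises (empty storage, an empty request string, a storage row
-- SHORTER than the first) and ragged storages with a row LONGER than the first, whose extra cells
-- A silently ignores — an artefact of A indexing everything by len(storage[0]).
def Pre_solution (storage : List String) (requests : List String) : Prop :=
  storage ≠ [] ∧ (∀ s ∈ storage, s.toList.length = (storage.headD "").toList.length)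
    ∧ (∀ r ∈ requests, r ≠ "")
instance (storage : List String) (requests : List String) : Decidable (Pre_solution storage requests) := by
  unfold Pre_solution; infer_instance

def pvWitness_solution : List String × List String := (["AB", "BA"], ["A", "BA"])

def Spec_solution (storage : List String) (requests : List String) (out : Int) : Prop := out = solution_alt storage requests
instance (storage : List String) (requests : List String) (out : Int) : Decidable (Spec_solution storage requests out) := by unfold Spec_solution; infer_instance

-- ===== CLAIM (what is proved, stated in full; the proofs are below) =====
def Claim_equal_solution : Prop := ∀ (storage : List String) (requests : List String), Dom_solution storage requests → Pre_solution storage requests → Spec_solution storage requests (solution storage requests)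


-- ===== LEMMAS AND PROOFS =====

-- ---- shared geometric notions (proof layer only) ----
def InbN (H' W' : Nat) (p : Int × Int) : Prop :=
  0 ≤ p.1 ∧ p.1 < (H' : Int) ∧ 0 ≤ p.2 ∧ p.2 < (W' : Int)


-- the outside-connected empty region: E is "this cell is empty"
inductive Reach (E : Int × Int → Prop) (H' W' : Nat) : Int × Int → Prop
  | base : Reach E H' W' (0, 0)
  | step {p q : Int × Int} : Reach E H' W' p → q ∈ bNbrs p → InbN H' W' q → E q → Reach E H' W' q

-- ---- generic matrix access (aCell/aVGet etc. are instances by rfl) ----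
def mGet {α : Type} (d : α) (m : List (List α)) (x y : Int) : α := (m.getD x.toNat []).getD y.toNat d
def mSet {α : Type} (m : List (List α)) (x y : Int) (a : α) : List (List α) :=
  m.set x.toNat ((m.getD x.toNat []).set y.toNat a)
def MDims {α : Type} (m : List (List α)) (H' W' : Nat) : Prop :=
  m.length = H' ∧ ∀ r ∈ m, r.length = W'

theorem mdims_set {α : Type} {m : List (List α)} {H' W' : Nat} (h : MDims m H' W') (x y : Int) (a : α) :
    MDims (mSet m x y a) H' W' := by
  obtain ⟨hl, hr⟩ := h
  refine ⟨by simpa [mSet] using hl, ?_⟩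
  by_cases hx : x.toNat < m.length
  · intro r hrm
    rcases List.mem_or_eq_of_mem_set hrm with h1 | h1
    · exact hr r h1
    · subst h1
      rw [List.getD_eq_getElem _ _ hx, List.length_set]
      exact hr _ (List.getElem_mem hx)
  · rw [mSet] at *
    rw [List.set_eq_of_length_le (by omega)]
    exact hr

theorem mget_set_self {α : Type} {d : α} {m : List (List α)} {H' W' : Nat} (h : MDims m H' W')
    {x y : Int} (hxy : InbN H' W' (x, y)) (a : α) : mGet d (mSet m x y a) x y = a := by
  obtain ⟨hl, hr⟩ := h
  obtain ⟨h1, h2, h3, h4⟩ := hxy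
  simp only at h1 h2 h3 h4
  have hx : x.toNat < m.length := by omega
  have hrow : m.getD x.toNat [] = m[x.toNat] := List.getD_eq_getElem _ _ hx
  have hy : y.toNat < (m[x.toNat]).length := by
    rw [hr _ (List.getElem_mem hx)]; omega
  simp only [mGet, mSet, List.getD_eq_getElem?_getD]
  rw [List.getElem?_set_self hx, Option.getD_some]
  rw [List.getElem?_eq_getElem hx] at *
  simp only [Option.getD_some] at hy ⊢
  rw [List.getElem?_set_self hy, Option.getD_some]

theorem mget_set_ne {α : Type} {d : α} {m : List (List α)} {H' W' : Nat} (h : MDims m H' W')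
    {x y u v : Int} (hxy : InbN H' W' (x, y)) (huv : 0 ≤ u ∧ 0 ≤ v) (hne : (u, v) ≠ (x, y)) (a : α) :
    mGet d (mSet m x y a) u v = mGet d m u v := by
  obtain ⟨hl, hr⟩ := h
  obtain ⟨h1, h2, h3, h4⟩ := hxy
  simp only at h1 h2 h3 h4
  have hx : x.toNat < m.length := by omega
  simp only [mGet, mSet, List.getD_eq_getElem?_getD]
  by_cases hux : u.toNat = x.toNat
  · have hu : u = x := by omega
    have hv : v ≠ y := by
      intro hvy; exact hne (by rw [hu, hvy])
    have hvy : y.toNat ≠ v.toNat := by omega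
    rw [hux, List.getElem?_set_self hx, Option.getD_some]
    rw [List.getElem?_set_ne hvy]
  · rw [List.getElem?_set_ne (fun hc => hux hc.symm)]

theorem mget_replicate {α : Type} (d : α) (H' W' : Nat) (x y : Int) :
    mGet d (List.replicate H' (List.replicate W' d)) x y = d := by
  simp only [mGet, List.getD_eq_getElem?_getD, List.getElem?_replicate]
  split_ifs <;> simp [List.getElem?_replicate] <;> split_ifs <;> simp

theorem lset_getD {α : Type} (l : List α) (i j : Nat) (a d : α) :
    ((l.set i a)[j]?).getD d = if i = j ∧ i < l.length then a else l[j]?.getD d := by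
  rw [List.getElem?_set]
  by_cases h1 : i = j
  · subst h1
    by_cases h2 : i < l.length
    · simp [h2]
    · simp [h2]
  · simp [h1]

theorem mget_set_cases {α : Type} (d : α) (m : List (List α)) (x y u v : Int) (a : α) :
    mGet d (mSet m x y a) u v = a ∨ mGet d (mSet m x y a) u v = mGet d m u v := by
  simp only [mGet, mSet, List.getD_eq_getElem?_getD]
  rw [lset_getD]
  split_ifs with h
  · rw [lset_getD]
    split_ifs with h2
    · exact Or.inl rfl
    · right; rw [← h.1]
  · exact Or.inr rfl

-- ---- A-side abbreviations ----
def Vis (v : List (List Int)) (p : Int × Int) : Prop := ¬ aVGet v p.1 p.2 = 0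
def ECellA (t : List (List String)) (p : Int × Int) : Prop := aCell t p.1 p.2 = ""
def TD (t : List (List String)) (H' W' : Nat) : Prop :=
  MDims t H' W' ∧ (t.headD []).length = W' ∧ 0 < H' ∧ 0 < W'

theorem aOob_eq_false_iff {t : List (List String)} {H' W' : Nat} (ht : TD t H' W') (x y : Int) :
    aOob t x y = false ↔ InbN H' W' (x, y) := by
  obtain ⟨⟨hl, _⟩, hh, _, _⟩ := ht
  have hh' : (t.head?.getD []).length = W' := by rwa [← List.headD_eq_head?_getD]
  simp [aOob, InbN, hl, hh', and_assoc]

def GoalA (t : List (List String)) (H' W' : Nat) (req : String) (n : Int × Int) : Prop :=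
  InbN H' W' n ∧ aCell t n.1 n.2 = req ∧ ∃ s, Reach (ECellA t) H' W' s ∧ n ∈ bNbrs s

def allF (H' W' : Nat) : Finset (Int × Int) :=
  ((Finset.range H') ×ˢ (Finset.range W')).image (fun ab => ((ab.1 : Int), (ab.2 : Int)))

theorem mem_allF {H' W' : Nat} {p : Int × Int} : p ∈ allF H' W' ↔ InbN H' W' p := by
  simp only [allF, Finset.mem_image, Finset.mem_product, Finset.mem_range, InbN]
  constructor
  · rintro ⟨⟨a, b⟩, ⟨ha, hb⟩, rfl⟩
    simp only
    refine ⟨by positivity, by exact_mod_cast ha, by positivity, by exact_mod_cast hb⟩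
  · rintro ⟨h1, h2, h3, h4⟩
    refine ⟨(p.1.toNat, p.2.toNat), ⟨by omega, by omega⟩, ?_⟩
    simp only
    rw [Int.toNat_of_nonneg h1, Int.toNat_of_nonneg h3]

theorem card_allF (H' W' : Nat) : (allF H' W').card = H' * W' := by
  rw [allF, Finset.card_image_of_injective _ (fun a b hab => ?_), Finset.card_product,
      Finset.card_range, Finset.card_range]
  obtain ⟨h1, h2⟩ := Prod.mk.injEq .. ▸ hab
  exact Prod.ext (by exact_mod_cast h1) (by exact_mod_cast h2)

def unvis (H' W' : Nat) (v : List (List Int)) : Finset (Int × Int) :=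
  (allF H' W').filter (fun p => aVGet v p.1 p.2 = 0)

def InvA (t : List (List String)) (H' W' : Nat) (req : String)
    (q : List (Int × Int)) (v : List (List Int)) (lst : PySem.Set (Int × Int)) : Prop :=
  MDims v H' W' ∧
  (∀ p ∈ q, InbN H' W' p ∧ Vis v p) ∧
  Vis v (0, 0) ∧
  (∀ p, InbN H' W' p → Vis v p → Reach (ECellA t) H' W' p) ∧
  (∀ p, InbN H' W' p → Vis v p → p ∉ q →
      (∀ n ∈ bNbrs p, InbN H' W' n → aCell t n.1 n.2 = "" → Vis v n) ∧
      (∀ n ∈ bNbrs p, InbN H' W' n → aCell t n.1 n.2 = req → n ∈ lst)) ∧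
  (∀ n ∈ lst, GoalA t H' W' req n)

theorem aVGet_mGet (v : List (List Int)) (x y : Int) : aVGet v x y = mGet 0 v x y := rfl
theorem aVSet_mSet (v : List (List Int)) (x y : Int) : aVSet v x y = mSet v x y 1 := rfl
theorem aCell_mGet (t : List (List String)) (x y : Int) : aCell t x y = mGet "" t x y := rfl
theorem aCellSet_mSet (t : List (List String)) (x y : Int) (a : String) :
    aCellSet t x y a = mSet t x y a := rfl

theorem nbr_of_move {sx sy : Int} {d : Int × Int} (hd : d ∈ aMoves) :
    (sx + d.1, sy + d.2) ∈ bNbrs (sx, sy) := by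
  fin_cases hd <;> simp [bNbrs] <;> omega

theorem move_of_nbr {s n : Int × Int} (hn : n ∈ bNbrs s) :
    ∃ d ∈ aMoves, n = (s.1 + d.1, s.2 + d.2) := by
  simp only [bNbrs, List.mem_cons, List.not_mem_nil, or_false] at hn
  rcases hn with rfl | rfl | rfl | rfl
  · exact ⟨(0, 1), by simp [aMoves], by simp⟩
  · exact ⟨(1, 0), by simp [aMoves], by simp⟩
  · exact ⟨(0, -1), by simp [aMoves], by simp [sub_eq_add_neg]⟩
  · exact ⟨(-1, 0), by simp [aMoves], by simp [sub_eq_add_neg]⟩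

-- the body of A's inner `for dx, dy in move` loop
def aF (t : List (List String)) (req : String) (sx sy : Int)
    (st : List (Int × Int) × List (List Int) × PySem.Set (Int × Int)) (d : Int × Int) :
    List (Int × Int) × List (List Int) × PySem.Set (Int × Int) :=
  let nx := sx + d.1
  let ny := sy + d.2
  if aOob t nx ny = false ∧ aCell t nx ny = req then
    (st.1, st.2.1, PySem.Set.add st.2.2 (nx, ny))
  else if aOob t nx ny = false ∧ aVGet st.2.1 nx ny = 0 ∧ aCell t nx ny = "" then
    (st.1 ++ [(nx, ny)], aVSet st.2.1 nx ny, st.2.2)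
  else st

theorem aBfs_eq_foldl_aF (t : List (List String)) (req : String) (fuel : Nat)
    (sx sy : Int) (qr : List (Int × Int)) (v : List (List Int)) (lst : PySem.Set (Int × Int)) :
    aBfs t req (fuel + 1) ((sx, sy) :: qr) v lst =
      aBfs t req fuel (aMoves.foldl (aF t req sx sy) (qr, v, lst)).1
        (aMoves.foldl (aF t req sx sy) (qr, v, lst)).2.1
        (aMoves.foldl (aF t req sx sy) (qr, v, lst)).2.2 := by
  rfl

def MoveConcl (t : List (List String)) (H' W' : Nat) (req : String) (sx sy : Int)
    (st : List (Int × Int) × List (List Int) × PySem.Set (Int × Int)) (d : Int × Int) : Prop :=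
  InbN H' W' (sx + d.1, sy + d.2) →
    (aCell t (sx + d.1) (sy + d.2) = req → (sx + d.1, sy + d.2) ∈ st.2.2) ∧
    (aCell t (sx + d.1) (sy + d.2) = "" → Vis st.2.1 (sx + d.1, sy + d.2))

def StInv (t : List (List String)) (H' W' : Nat) (req : String)
    (st : List (Int × Int) × List (List Int) × PySem.Set (Int × Int)) : Prop :=
  MDims st.2.1 H' W' ∧
  (∀ p ∈ st.1, InbN H' W' p ∧ Vis st.2.1 p) ∧
  (∀ p, InbN H' W' p → Vis st.2.1 p → Reach (ECellA t) H' W' p) ∧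
  (∀ n ∈ st.2.2, GoalA t H' W' req n)

theorem aF_one (t : List (List String)) (H' W' : Nat) (req : String) (sx sy : Int)
    (ht : TD t H' W') (hreq : req ≠ "") (hsR : Reach (ECellA t) H' W' (sx, sy))
    (st : List (Int × Int) × List (List Int) × PySem.Set (Int × Int))
    (hst : StInv t H' W' req st) (d : Int × Int) (hd : d ∈ aMoves) :
    StInv t H' W' req (aF t req sx sy st d) ∧
    (∀ p, Vis st.2.1 p → Vis (aF t req sx sy st d).2.1 p) ∧
    (∀ n ∈ st.2.2, n ∈ (aF t req sx sy st d).2.2) ∧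
    (∀ p ∈ st.1, p ∈ (aF t req sx sy st d).1) ∧
    (∀ p, InbN H' W' p → Vis (aF t req sx sy st d).2.1 p → Vis st.2.1 p ∨ p ∈ (aF t req sx sy st d).1) ∧
    ((aF t req sx sy st d).1.length + (unvis H' W' (aF t req sx sy st d).2.1).card
        = st.1.length + (unvis H' W' st.2.1).card) ∧
    MoveConcl t H' W' req sx sy (aF t req sx sy st d) d := by
  obtain ⟨hdims, hq, hsound, hlst⟩ := hst
  have hInbOf : ∀ x y : Int, aOob t x y = false ↔ InbN H' W' (x, y) :=
    fun x y => aOob_eq_false_iff ht x y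
  have hnb : (sx + d.1, sy + d.2) ∈ bNbrs (sx, sy) := nbr_of_move hd
  simp only [aF]
  split_ifs with h1 h2
  · -- the cell is an item of the requested colour: it is added to lst
    obtain ⟨hoob, hcell⟩ := h1
    have hnInb : InbN H' W' (sx + d.1, sy + d.2) := (hInbOf _ _).mp hoob
    refine ⟨⟨hdims, hq, hsound, ?_⟩, fun p hp => hp, ?_, fun p hp => hp,
        fun p _ hp => Or.inl hp, rfl, ?_⟩
    · intro x hx
      rcases (PySem.Set.mem_add _ _ _).mp hx with hx | rfl
      · exact hlst x hx
      · exact ⟨hnInb, hcell, ⟨(sx, sy), hsR, hnb⟩⟩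
    · intro x hx; exact (PySem.Set.mem_add _ _ _).mpr (Or.inl hx)
    · intro _
      refine ⟨fun _ => (PySem.Set.mem_add _ _ _).mpr (Or.inr rfl), fun hcell0 => ?_⟩
      exact absurd (hcell.symm.trans hcell0) hreq
  · -- the cell is empty and unvisited: mark it and enqueue it
    obtain ⟨hoob, hv0, hcell⟩ := h2
    have hnInb : InbN H' W' (sx + d.1, sy + d.2) := (hInbOf _ _).mp hoob
    have hdims' : MDims (aVSet st.2.1 (sx + d.1) (sy + d.2)) H' W' := by
      rw [aVSet_mSet]; exact mdims_set hdims _ _ _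
    have hVisN : Vis (aVSet st.2.1 (sx + d.1) (sy + d.2)) (sx + d.1, sy + d.2) := by
      rw [Vis, aVGet_mGet, aVSet_mSet, mget_set_self hdims hnInb]
      exact one_ne_zero
    have hvmono : ∀ p, Vis st.2.1 p → Vis (aVSet st.2.1 (sx + d.1) (sy + d.2)) p := by
      intro p hp
      rcases mget_set_cases 0 st.2.1 (sx + d.1) (sy + d.2) p.1 p.2 1 with hc | hc
      · rw [Vis, aVGet_mGet, aVSet_mSet, hc]; exact one_ne_zero
      · rw [Vis, aVGet_mGet, aVSet_mSet, hc]; exact hp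
    have hvne : ∀ p : Int × Int, InbN H' W' p → p ≠ (sx + d.1, sy + d.2) →
        (Vis (aVSet st.2.1 (sx + d.1) (sy + d.2)) p ↔ Vis st.2.1 p) := by
      intro p hpInb hpne
      simp only [Vis, aVGet_mGet, aVSet_mSet]
      rw [mget_set_ne hdims hnInb ⟨hpInb.1, hpInb.2.2.1⟩ (by simpa using hpne)]
    refine ⟨⟨hdims', ?_, ?_, hlst⟩, hvmono, fun x hx => hx, ?_, ?_, ?_, ?_⟩
    · -- queue elements
      intro p hp
      rcases List.mem_append.mp hp with hp | hp
      · exact ⟨(hq p hp).1, hvmono p (hq p hp).2⟩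
      · rw [List.mem_singleton] at hp; subst hp
        exact ⟨hnInb, hVisN⟩
    · -- soundness of visited
      intro p hpInb hpVis
      by_cases hps : p = (sx + d.1, sy + d.2)
      · subst hps; exact Reach.step hsR hnb hnInb hcell
      · exact hsound p hpInb ((hvne p hpInb hps).mp hpVis)
    · -- queue monotone
      intro p hp; exact List.mem_append.mpr (Or.inl hp)
    · -- newly visited are enqueued
      intro p hpInb hpVis
      by_cases hps : p = (sx + d.1, sy + d.2)
      · subst hps; exact Or.inr (List.mem_append.mpr (Or.inr (List.mem_singleton.mpr rfl)))
      · exact Or.inl ((hvne p hpInb hps).mp hpVis)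
    · -- measure bookkeeping
      have hmemn : (sx + d.1, sy + d.2) ∈ unvis H' W' st.2.1 :=
        Finset.mem_filter.mpr ⟨mem_allF.mpr hnInb, hv0⟩
      have hunvis : unvis H' W' (aVSet st.2.1 (sx + d.1) (sy + d.2))
          = (unvis H' W' st.2.1).erase (sx + d.1, sy + d.2) := by
        apply Finset.ext
        intro p
        simp only [unvis, Finset.mem_filter, Finset.mem_erase]
        constructor
        · rintro ⟨hpA, hp0⟩
          have hpInb := mem_allF.mp hpA
          by_cases hps : p = (sx + d.1, sy + d.2)
          · exfalso; subst hps; exact hVisN hp0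
          · refine ⟨hps, hpA, ?_⟩
            rw [aVGet_mGet, aVSet_mSet,
              mget_set_ne hdims hnInb ⟨hpInb.1, hpInb.2.2.1⟩ (by simpa using hps)] at hp0
            exact hp0
        · rintro ⟨hps, hpA, hp0⟩
          have hpInb := mem_allF.mp hpA
          refine ⟨hpA, ?_⟩
          rw [aVGet_mGet, aVSet_mSet,
            mget_set_ne hdims hnInb ⟨hpInb.1, hpInb.2.2.1⟩ (by simpa using hps)]
          exact hp0
      have hcard : ((unvis H' W' st.2.1).erase (sx + d.1, sy + d.2)).card
          = (unvis H' W' st.2.1).card - 1 := Finset.card_erase_of_mem hmemn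
      have hpos : 1 ≤ (unvis H' W' st.2.1).card := Finset.card_pos.mpr ⟨_, hmemn⟩
      simp only [List.length_append, List.length_singleton, hunvis, hcard]
      omega
    · -- MoveConcl
      intro _
      refine ⟨fun hc => absurd ⟨hoob, hc⟩ h1, fun _ => hVisN⟩
  · -- nothing happens
    refine ⟨⟨hdims, hq, hsound, hlst⟩, fun p hp => hp, fun x hx => hx, fun p hp => hp,
        fun p _ hp => Or.inl hp, rfl, ?_⟩
    intro hnInb
    have hoob : aOob t (sx + d.1) (sy + d.2) = false := (hInbOf _ _).mpr hnInb
    constructor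
    · intro hc; exact absurd ⟨hoob, hc⟩ h1
    · intro hc
      intro hv0
      exact h2 ⟨hoob, hv0, hc⟩

theorem aF_fold (t : List (List String)) (H' W' : Nat) (req : String) (sx sy : Int)
    (ht : TD t H' W') (hreq : req ≠ "") (hsR : Reach (ECellA t) H' W' (sx, sy))
    (ms : List (Int × Int)) (hms : ∀ d ∈ ms, d ∈ aMoves)
    (st : List (Int × Int) × List (List Int) × PySem.Set (Int × Int))
    (hst : StInv t H' W' req st) :
    StInv t H' W' req (ms.foldl (aF t req sx sy) st) ∧
    (∀ p, Vis st.2.1 p → Vis (ms.foldl (aF t req sx sy) st).2.1 p) ∧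
    (∀ n ∈ st.2.2, n ∈ (ms.foldl (aF t req sx sy) st).2.2) ∧
    (∀ p ∈ st.1, p ∈ (ms.foldl (aF t req sx sy) st).1) ∧
    (∀ p, InbN H' W' p → Vis (ms.foldl (aF t req sx sy) st).2.1 p → Vis st.2.1 p ∨ p ∈ (ms.foldl (aF t req sx sy) st).1) ∧
    ((ms.foldl (aF t req sx sy) st).1.length + (unvis H' W' (ms.foldl (aF t req sx sy) st).2.1).card
        = st.1.length + (unvis H' W' st.2.1).card) ∧
    (∀ d ∈ ms, MoveConcl t H' W' req sx sy (ms.foldl (aF t req sx sy) st) d) := by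
  induction ms generalizing st with
  | nil =>
    exact ⟨hst, fun p h => h, fun x h => h, fun p h => h, fun p _ h => Or.inl h, rfl, by simp⟩
  | cons d ms ih =>
    rw [List.foldl_cons]
    obtain ⟨hst1, hvmono1, hlmono1, hqmono1, hnew1, hmeas1, hmv1⟩ :=
      aF_one t H' W' req sx sy ht hreq hsR st hst d (hms d List.mem_cons_self)
    obtain ⟨hst2, hvmono2, hlmono2, hqmono2, hnew2, hmeas2, hmv2⟩ :=
      ih (fun d' hd' => hms d' (List.mem_cons_of_mem _ hd')) _ hst1
    refine ⟨hst2, fun p h => hvmono2 p (hvmono1 p h), fun x h => hlmono2 x (hlmono1 x h),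
        fun p h => hqmono2 p (hqmono1 p h), ?_, by omega, ?_⟩
    · intro p hpInb hp
      rcases hnew2 p hpInb hp with hp1 | hp1
      · rcases hnew1 p hpInb hp1 with hp2 | hp2
        · exact Or.inl hp2
        · exact Or.inr (hqmono2 p hp2)
      · exact Or.inr hp1
    · intro d' hd'
      rcases List.mem_cons.mp hd' with rfl | hd'
      · intro hnInb
        obtain ⟨c1, c2⟩ := hmv1 hnInb
        exact ⟨fun h => hlmono2 _ (c1 h), fun h => hvmono2 _ (c2 h)⟩
      · exact hmv2 d' hd' 

theorem reach_inb {E : Int × Int → Prop} {H' W' : Nat} (h00 : InbN H' W' (0, 0)) {p : Int × Int}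
    (h : Reach E H' W' p) : InbN H' W' p := by
  induction h with
  | base => exact h00
  | step _ _ hq _ _ => exact hq

theorem aBfs_done (t : List (List String)) (H' W' : Nat) (req : String) (ht : TD t H' W')
    (v : List (List Int)) (lst : PySem.Set (Int × Int))
    (hinv : InvA t H' W' req [] v lst) (n : Int × Int) :
    n ∈ lst ↔ GoalA t H' W' req n := by
  obtain ⟨hdims, hq, h00, hsound, hclosed, hlst⟩ := hinv
  have hInb00 : InbN H' W' (0, 0) := by
    obtain ⟨_, _, h1, h2⟩ := ht
    exact ⟨le_refl 0, by simp only; exact_mod_cast h1, le_refl 0, by simp only; exact_mod_cast h2⟩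
  constructor
  · exact hlst n
  · rintro ⟨hnInb, hncell, s, hsR, hnb⟩
    have hvisAll : ∀ p, Reach (ECellA t) H' W' p → Vis v p := by
      intro p hp
      induction hp with
      | base => exact h00
      | step hp' hq' hinb' hE' ih =>
        exact (hclosed _ (reach_inb hInb00 hp') ih (List.not_mem_nil)).1 _ hq' hinb' hE'
    exact (hclosed s (reach_inb hInb00 hsR) (hvisAll s hsR) (List.not_mem_nil)).2 n hnb hnInb hncell

theorem aBfs_mem (t : List (List String)) (H' W' : Nat) (req : String) (ht : TD t H' W')
    (hreq : req ≠ "")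
    (fuel : Nat) (q : List (Int × Int)) (v : List (List Int)) (lst : PySem.Set (Int × Int))
    (hinv : InvA t H' W' req q v lst)
    (hfuel : q.length + (unvis H' W' v).card ≤ fuel) (n : Int × Int) :
    n ∈ aBfs t req fuel q v lst ↔ GoalA t H' W' req n := by
  induction fuel generalizing q v lst with
  | zero =>
    have hq : q = [] := by
      cases q with
      | nil => rfl
      | cons a l => exfalso; simp only [List.length_cons] at hfuel; omega
    subst hq
    exact aBfs_done t H' W' req ht v lst hinv n
  | succ fuel ih =>
    match q with
    | [] => exact aBfs_done t H' W' req ht v lst hinv n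
    | (sx, sy) :: qr =>
      rw [aBfs_eq_foldl_aF]
      obtain ⟨hdims, hq, h00, hsound, hclosed, hlst⟩ := hinv
      have hhead := hq _ List.mem_cons_self
      have hsR := hsound _ hhead.1 hhead.2
      have hst : StInv t H' W' req (qr, v, lst) :=
        ⟨hdims, fun p hp => hq p (List.mem_cons_of_mem _ hp), hsound, hlst⟩
      obtain ⟨⟨hdims', hq', hsound', hlst'⟩, hvmono, hlmono, hqmono, hnew, hmeas, hmv⟩ :=
        aF_fold t H' W' req sx sy ht hreq hsR aMoves (fun d hd => hd) (qr, v, lst) hst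
      apply ih
      · refine ⟨hdims', hq', hvmono _ h00, hsound', ?_, hlst'⟩
        intro p hpInb hpVis hpq
        rcases hnew p hpInb hpVis with hpv | hpin
        · by_cases hps : p = (sx, sy)
          · subst hps
            constructor
            · intro m hm hmInb hmE
              obtain ⟨d, hd, rfl⟩ := move_of_nbr hm
              exact ((hmv d hd) hmInb).2 hmE
            · intro m hm hmInb hmc
              obtain ⟨d, hd, rfl⟩ := move_of_nbr hm
              exact ((hmv d hd) hmInb).1 hmc
          · have hpq0 : p ∉ (sx, sy) :: qr := by
              intro hc
              rcases List.mem_cons.mp hc with hc | hc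
              exacts [hps hc, hpq (hqmono p hc)]
            obtain ⟨hcl1, hcl2⟩ := hclosed p hpInb hpv hpq0
            exact ⟨fun m hm hi he => hvmono _ (hcl1 m hm hi he),
                   fun m hm hi hc => hlmono _ (hcl2 m hm hi hc)⟩
        · exact absurd hpin hpq
      · dsimp only at hmeas
        simp only [List.length_cons] at hfuel
        omega

-- ---- B-side ----
def EDictB (g : PySem.Dict (Int × Int) String) (p : Int × Int) : Prop := g.get? p = none

theorem bInb_eq_true_iff (H' W' : Nat) (p : Int × Int) :
    bInb (H' : Int) (W' : Int) p = true ↔ InbN H' W' p := by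
  simp [bInb, InbN, and_assoc]

theorem mem_foldl_acc {α β : Type} (l : List β) (step : List α → β → List α) (P : β → α → Prop)
    (hstep : ∀ a b x, x ∈ step a b ↔ x ∈ a ∨ P b x) (a : List α) (x : α) :
    x ∈ l.foldl step a ↔ x ∈ a ∨ ∃ b ∈ l, P b x := by
  induction l generalizing a with
  | nil => simp
  | cons b bs ih =>
    rw [List.foldl_cons, ih, hstep]
    simp only [List.mem_cons]
    constructor
    · rintro ((h | h) | ⟨c, hc, hP⟩)
      · exact Or.inl h
      · exact Or.inr ⟨b, Or.inl rfl, h⟩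
      · exact Or.inr ⟨c, Or.inr hc, hP⟩
    · rintro (h | ⟨c, (rfl | hc), hP⟩)
      · exact Or.inl (Or.inl h)
      · exact Or.inl (Or.inr hP)
      · exact Or.inr ⟨c, hc, hP⟩

def bAdds (g : PySem.Dict (Int × Int) String) (h w : Int) (reach : PySem.Set (Int × Int)) :
    PySem.Set (Int × Int) :=
  reach.foldl (fun a p =>
    (bNbrs p).foldl (fun a n =>
      if bInb h w n = true ∧ g.get? n = none ∧ ¬ n ∈ reach then PySem.Set.add a n else a) a)
    PySem.Set.empty

theorem bFlood_succ (g : PySem.Dict (Int × Int) String) (h w : Int) (fuel : Nat)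
    (reach : PySem.Set (Int × Int)) :
    bFlood g h w (fuel + 1) reach =
      if bAdds g h w reach = [] then reach
      else bFlood g h w fuel (PySem.Set.union reach (bAdds g h w reach)) := rfl

theorem reach_subset_of_closed (E : Int × Int → Prop) (H' W' : Nat)
    (reach : PySem.Set (Int × Int)) (h0 : (0, 0) ∈ reach)
    (hcl : ∀ s ∈ reach, ∀ q ∈ bNbrs s, InbN H' W' q → E q → q ∈ reach) :
    ∀ p, Reach E H' W' p → p ∈ reach := by
  intro p hp
  induction hp with
  | base => exact h0
  | step hs hq hqInb hqE ih => exact hcl _ ih _ hq hqInb hqE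

theorem mem_bAdds (g : PySem.Dict (Int × Int) String) (h w : Int)
    (reach : PySem.Set (Int × Int)) (x : Int × Int) :
    x ∈ bAdds g h w reach ↔
      (bInb h w x = true ∧ g.get? x = none ∧ x ∉ reach) ∧ ∃ p ∈ reach, x ∈ bNbrs p := by
  rw [bAdds, mem_foldl_acc _ _
    (fun p x => (bInb h w x = true ∧ g.get? x = none ∧ x ∉ reach) ∧ x ∈ bNbrs p) ?hstep]
  · constructor
    · rintro (hx | ⟨p, hp, hc, hnb⟩)
      · exact absurd hx (List.not_mem_nil)
      · exact ⟨hc, p, hp, hnb⟩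
    · rintro ⟨hc, p, hp, hnb⟩
      exact Or.inr ⟨p, hp, hc, hnb⟩
  case hstep =>
    intro a p x
    rw [mem_foldl_acc _ _ (fun n x => (bInb h w n = true ∧ g.get? n = none ∧ n ∉ reach) ∧ x = n)
      ?hstep2]
    · constructor
      · rintro (hx | ⟨n, hn, hc, rfl⟩)
        · exact Or.inl hx
        · exact Or.inr ⟨hc, hn⟩
      · rintro (hx | ⟨hc, hn⟩)
        · exact Or.inl hx
        · exact Or.inr ⟨x, hn, hc, rfl⟩
    case hstep2 =>
      intro a n x
      split_ifs with hc
      · rw [PySem.Set.mem_add]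
        constructor
        · rintro (hx | rfl)
          · exact Or.inl hx
          · exact Or.inr ⟨hc, rfl⟩
        · rintro (hx | ⟨_, rfl⟩)
          · exact Or.inl hx
          · exact Or.inr rfl
      · constructor
        · exact Or.inl
        · rintro (hx | ⟨hc', rfl⟩)
          · exact hx
          · exact absurd hc' hc

def InvB (g : PySem.Dict (Int × Int) String) (H' W' : Nat) (reach : PySem.Set (Int × Int)) : Prop :=
  (0, 0) ∈ reach ∧ reach.Nodup ∧ (∀ p ∈ reach, Reach (EDictB g) H' W' p)

theorem bFlood_mem (g : PySem.Dict (Int × Int) String) (H' W' : Nat) (h00 : InbN H' W' (0, 0))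
    (fuel : Nat) (reach : PySem.Set (Int × Int)) (hinv : InvB g H' W' reach)
    (hfuel : ((allF H' W') \ reach.toFinset).card + 1 ≤ fuel) (p : Int × Int) :
    p ∈ bFlood g (H' : Int) (W' : Int) fuel reach ↔ Reach (EDictB g) H' W' p := by
  induction fuel generalizing reach with
  | zero => exact absurd hfuel (by omega)
  | succ fuel ih =>
    obtain ⟨h0r, hnd, hsoundR⟩ := hinv
    rw [bFlood_succ]
    split_ifs with hempty
    · constructor
      · intro hp; exact hsoundR p hp
      · refine reach_subset_of_closed (EDictB g) H' W' reach h0r ?_ p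
        intro s hs q hq hqInb hqE
        by_cases hqr : q ∈ reach
        · exact hqr
        · exfalso
          have : q ∈ bAdds g (H' : Int) (W' : Int) reach :=
            (mem_bAdds _ _ _ _ _).mpr
              ⟨⟨(bInb_eq_true_iff H' W' q).mpr hqInb, hqE, hqr⟩, s, hs, hq⟩
          rw [hempty] at this
          exact List.not_mem_nil this
    · have hmemun : ∀ x : Int × Int,
          x ∈ PySem.Set.union reach (bAdds g (H' : Int) (W' : Int) reach)
            ↔ x ∈ reach ∨ x ∈ bAdds g (H' : Int) (W' : Int) reach := by
        intro x; exact PySem.Set.mem_union _ _ _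
      apply ih
      · refine ⟨(hmemun _).mpr (Or.inl h0r), PySem.Set.nodup_union _ _ hnd, ?_⟩
        intro x hx
        rcases (hmemun x).mp hx with hx | hx
        · exact hsoundR x hx
        · obtain ⟨⟨hinb, hnone, _⟩, s, hs, hnb⟩ := (mem_bAdds _ _ _ _ _).mp hx
          exact Reach.step (hsoundR s hs) hnb ((bInb_eq_true_iff H' W' x).mp hinb) hnone
      · obtain ⟨n0, hn0⟩ := List.exists_mem_of_ne_nil _ hempty
        obtain ⟨⟨hinb0, _, hnr0⟩, _⟩ := (mem_bAdds _ _ _ _ _).mp hn0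
        have hsub : (allF H' W' \ (PySem.Set.union reach (bAdds g (H' : Int) (W' : Int) reach)).toFinset)
            ⊂ allF H' W' \ reach.toFinset := by
          refine Finset.ssubset_iff_of_subset ?_ |>.mpr ?_
          · intro x hx
            rw [Finset.mem_sdiff] at hx ⊢
            refine ⟨hx.1, fun hc => hx.2 ?_⟩
            rw [List.mem_toFinset] at hc ⊢
            exact (hmemun x).mpr (Or.inl hc)
          · refine ⟨n0, ?_, ?_⟩
            · rw [Finset.mem_sdiff, List.mem_toFinset]
              exact ⟨mem_allF.mpr ((bInb_eq_true_iff H' W' n0).mp hinb0), hnr0⟩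
            · rw [Finset.mem_sdiff, List.mem_toFinset]
              rintro ⟨-, hno⟩
              exact hno ((hmemun n0).mpr (Or.inr hn0))
        have := Finset.card_lt_card hsub
        omega

-- ---- the grid relation ----
def GRel (H' W' : Nat) (t : List (List String)) (g : PySem.Dict (Int × Int) String) : Prop :=
  TD t H' W' ∧
  (∀ p, InbN H' W' p → aCell t p.1 p.2 = (g.get? p).getD "") ∧
  (∀ kv ∈ g.items, InbN H' W' kv.1 ∧ kv.2 ≠ "") ∧
  g.keys.Nodup

theorem reach_congr {E E' : Int × Int → Prop} {H' W' : Nat}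
    (h : ∀ p, InbN H' W' p → (E p ↔ E' p)) {p : Int × Int} (hr : Reach E H' W' p) :
    Reach E' H' W' p := by
  induction hr with
  | base => exact Reach.base
  | step _ hq hinb hE ih => exact Reach.step ih hq hinb ((h _ hinb).mp hE)

theorem singleton_ne_empty (c : Char) : String.singleton c ≠ "" := by
  intro h
  simpa using congrArg String.toList h

theorem headD_length {α : Type} {t : List (List α)} {H' W' : Nat} (h : MDims t H' W')
    (hpos : 0 < H') : (t.headD []).length = W' := by
  obtain ⟨hl, hr⟩ := h
  cases t with
  | nil => simp at hl; omega
  | cons r t => exact hr r List.mem_cons_self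

theorem rel_empty_iff {H' W' : Nat} {t : List (List String)} {g : PySem.Dict (Int × Int) String}
    (hrel : GRel H' W' t g) {p : Int × Int} (hp : InbN H' W' p) :
    (ECellA t p ↔ EDictB g p) := by
  obtain ⟨ht, hpt, hval, hnd⟩ := hrel
  rw [ECellA, EDictB, hpt p hp]
  constructor
  · intro hcell
    cases hg : g.get? p with
    | none => rfl
    | some v =>
      exfalso
      have hv := (hval _ (PySem.Dict.mem_items_of_get?_eq_some g hg)).2
      rw [hg] at hcell
      exact hv hcell
  · intro hg; rw [hg]; rfl

theorem clear_fold_cell (H' W' : Nat) (l : List (Int × Int)) (t : List (List String))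
    (hdims : MDims t H' W') (hl : ∀ x ∈ l, InbN H' W' x) (p : Int × Int) (hp : InbN H' W' p) :
    aCell (l.foldl (fun t q => aCellSet t q.1 q.2 "") t) p.1 p.2
      = if p ∈ l then "" else aCell t p.1 p.2 := by
  induction l generalizing t with
  | nil => simp
  | cons q0 l ih =>
    rw [List.foldl_cons]
    have hq0 : InbN H' W' q0 := hl q0 List.mem_cons_self
    have hdims1 : MDims (aCellSet t q0.1 q0.2 "") H' W' := by
      rw [aCellSet_mSet]; exact mdims_set hdims _ _ _
    rw [ih _ hdims1 (fun x hx => hl x (List.mem_cons_of_mem _ hx))]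
    by_cases hpq : p = q0
    · subst hpq
      have : aCell (aCellSet t p.1 p.2 "") p.1 p.2 = "" := by
        rw [aCell_mGet, aCellSet_mSet, mget_set_self hdims (by simpa using hq0)]
      simp [this, List.mem_cons]
    · have : aCell (aCellSet t q0.1 q0.2 "") p.1 p.2 = aCell t p.1 p.2 := by
        rw [aCell_mGet, aCellSet_mSet,
          mget_set_ne hdims (by simpa using hq0) ⟨hp.1, hp.2.2.1⟩ (by simpa using hpq)]
        rfl
      rw [this]
      simp only [List.mem_cons]
      by_cases hpl : p ∈ l <;> simp [hpl, hpq]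

theorem clear_fold_dims (H' W' : Nat) (l : List (Int × Int)) (t : List (List String))
    (hdims : MDims t H' W') :
    MDims (l.foldl (fun t q => aCellSet t q.1 q.2 "") t) H' W' := by
  induction l generalizing t with
  | nil => exact hdims
  | cons q0 l ih =>
    rw [List.foldl_cons]
    exact ih _ (by rw [aCellSet_mSet]; exact mdims_set hdims _ _ _)

theorem find?_filter_not_key (l : List ((Int × Int) × String)) (q p : Int × Int) :
    List.find? (fun e => e.1 == p) (l.filter (fun e => !e.1 == q)) =
      if p = q then none else List.find? (fun e => e.1 == p) l := by
  induction l with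
  | nil => split_ifs <;> rfl
  | cons a l ih =>
    rw [List.filter_cons]
    by_cases haq : (a.1 == q) = true
    · rw [if_neg (by simp [haq]), ih]
      by_cases hpq : p = q
      · simp [hpq]
      · rw [if_neg hpq, if_neg hpq,
            List.find?_cons_of_neg (p := fun e : (Int × Int) × String => e.1 == p) (by
              have haq' : a.1 = q := by simpa using haq
              simp [haq']
              exact fun h => hpq h.symm)]
    · rw [if_pos (by simpa using haq)]
      by_cases hap : (a.1 == p) = true
      · rw [List.find?_cons_of_pos (p := fun e : (Int × Int) × String => e.1 == p) hap, List.find?_cons_of_pos (p := fun e : (Int × Int) × String => e.1 == p) hap]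
        have hap' : a.1 = p := by simpa using hap
        have hpq : ¬ p = q := by
          rw [← hap']; simpa using haq
        rw [if_neg hpq]
      · rw [List.find?_cons_of_neg (p := fun e : (Int × Int) × String => e.1 == p) (by simpa using hap), ih]
        by_cases hpq : p = q
        · simp [hpq]
        · rw [if_neg hpq, if_neg hpq, List.find?_cons_of_neg (p := fun e : (Int × Int) × String => e.1 == p) (by simpa using hap)]

theorem get?_erase (g : PySem.Dict (Int × Int) String) (q p : Int × Int) :
    (g.erase q).get? p = if p = q then none else g.get? p := by
  obtain ⟨l⟩ := g
  simp only [PySem.Dict.erase, PySem.Dict.get?]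
  rw [find?_filter_not_key]
  split_ifs <;> rfl

theorem erase_items_subset {κ ν : Type} [BEq κ] (g : PySem.Dict κ ν) (q : κ) :
    ∀ kv ∈ (g.erase q).items, kv ∈ g.items := by
  intro kv hkv
  exact List.mem_of_mem_filter hkv

theorem erase_keys_sublist {κ ν : Type} [BEq κ] (g : PySem.Dict κ ν) (q : κ) :
    (g.erase q).keys.Sublist g.keys := by
  exact List.Sublist.map _ List.filter_sublist

theorem erase_fold_get? (l : List (Int × Int)) (g : PySem.Dict (Int × Int) String) (p : Int × Int) :
    (l.foldl (fun g q => g.erase q) g).get? p = if p ∈ l then none else g.get? p := by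
  induction l generalizing g with
  | nil => simp
  | cons q0 l ih =>
    rw [List.foldl_cons, ih]
    by_cases hpq : p = q0
    · simp [hpq, get?_erase, List.mem_cons]
    · by_cases hpl : p ∈ l <;> simp [hpl, get?_erase, hpq, List.mem_cons]

theorem erase_fold_items (l : List (Int × Int)) (g : PySem.Dict (Int × Int) String) :
    ∀ kv ∈ (l.foldl (fun g q => g.erase q) g).items, kv ∈ g.items := by
  induction l generalizing g with
  | nil => exact fun kv h => h
  | cons q0 l ih =>
    rw [List.foldl_cons]
    exact fun kv h => erase_items_subset g q0 kv (ih _ kv h)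

theorem erase_fold_nodup (l : List (Int × Int)) (g : PySem.Dict (Int × Int) String)
    (h : g.keys.Nodup) : (l.foldl (fun g q => g.erase q) g).keys.Nodup := by
  induction l generalizing g with
  | nil => exact h
  | cons q0 l ih =>
    rw [List.foldl_cons]
    exact ih _ ((erase_keys_sublist g q0).nodup h)

theorem crane_inner (H' W' : Nat) (c : String) (hc : c ≠ "") (i : Int)
    (hi : 0 ≤ i ∧ i < (H' : Int)) (jr : List Int) (hjr : ∀ j ∈ jr, 0 ≤ j ∧ j < (W' : Int)) :
    ∀ t, MDims t H' W' →
      MDims (jr.foldl (fun t j => if aCell t i j = c then aCellSet t i j "" else t) t) H' W' ∧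
      ∀ p : Int × Int, InbN H' W' p →
        aCell (jr.foldl (fun t j => if aCell t i j = c then aCellSet t i j "" else t) t) p.1 p.2
          = if p.1 = i ∧ p.2 ∈ jr ∧ aCell t p.1 p.2 = c then "" else aCell t p.1 p.2 := by
  induction jr with
  | nil => intro t hdims; exact ⟨hdims, fun p _ => by simp⟩
  | cons j0 jr ih =>
    intro t hdims
    have hj0 := hjr j0 List.mem_cons_self
    have hInb0 : InbN H' W' (i, j0) := ⟨hi.1, hi.2, hj0.1, hj0.2⟩
    have hdims1 : MDims (if aCell t i j0 = c then aCellSet t i j0 "" else t) H' W' := by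
      split_ifs with h
      · rw [aCellSet_mSet]; exact mdims_set hdims _ _ _
      · exact hdims
    obtain ⟨hd2, hcell2⟩ := ih (fun j hj => hjr j (List.mem_cons_of_mem _ hj)) _ hdims1
    rw [List.foldl_cons]
    refine ⟨hd2, ?_⟩
    intro p hp
    rw [hcell2 p hp]
    have h0 : aCell (if aCell t i j0 = c then aCellSet t i j0 "" else t) p.1 p.2
        = if p = (i, j0) ∧ aCell t p.1 p.2 = c then "" else aCell t p.1 p.2 := by
      split_ifs with h1 h2 h2
      · obtain ⟨rfl, _⟩ := h2
        rw [aCell_mGet, aCellSet_mSet, mget_set_self hdims hInb0]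
      · have hpne : p ≠ (i, j0) := by
          intro hpe
          exact h2 ⟨hpe, by rw [hpe] at *; exact h1⟩
        rw [aCell_mGet, aCellSet_mSet,
            mget_set_ne hdims hInb0 ⟨hp.1, hp.2.2.1⟩ (by simpa using hpne)]
        rfl
      · exfalso
        obtain ⟨hpe, hcol⟩ := h2
        rw [hpe] at hcol
        exact h1 hcol
      · rfl
    rw [h0]
    by_cases hpe0 : p = (i, j0) ∧ aCell t p.1 p.2 = c
    · rw [if_pos hpe0]
      obtain ⟨hpe, hcol⟩ := hpe0
      have hnc : ¬ ("" = c) := fun h => hc h.symm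
      rw [if_neg (by rintro ⟨-, -, h⟩; exact hnc h),
          if_pos ⟨by rw [hpe], by rw [hpe]; exact List.mem_cons_self, hcol⟩]
    · rw [if_neg hpe0]
      by_cases hcond : p.1 = i ∧ p.2 ∈ jr ∧ aCell t p.1 p.2 = c
      · rw [if_pos hcond, if_pos ⟨hcond.1, List.mem_cons_of_mem _ hcond.2.1, hcond.2.2⟩]
      · rw [if_neg hcond, if_neg ?_]
        rintro ⟨hp1, hpm, hpc⟩
        rcases List.mem_cons.mp hpm with hj | hj
        · exact hpe0 ⟨Prod.ext hp1 hj, hpc⟩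
        · exact hcond ⟨hp1, hj, hpc⟩

theorem crane_outer (H' W' : Nat) (c : String) (hc : c ≠ "") (hH : 0 < H')
    (ir : List Int) (hir : ∀ i ∈ ir, 0 ≤ i ∧ i < (H' : Int)) :
    ∀ t, MDims t H' W' →
      MDims (ir.foldl (fun t i =>
        (PySem.List.pyRange 0 ((t.headD []).length : Int) 1).foldl
          (fun t j => if aCell t i j = c then aCellSet t i j "" else t) t) t) H' W' ∧
      ∀ p : Int × Int, InbN H' W' p →
        aCell (ir.foldl (fun t i =>
          (PySem.List.pyRange 0 ((t.headD []).length : Int) 1).foldl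
            (fun t j => if aCell t i j = c then aCellSet t i j "" else t) t) t) p.1 p.2
          = if p.1 ∈ ir ∧ aCell t p.1 p.2 = c then "" else aCell t p.1 p.2 := by
  induction ir with
  | nil => intro t hdims; exact ⟨hdims, fun p _ => by simp⟩
  | cons i0 ir ih =>
    intro t hdims
    have hi0 := hir i0 List.mem_cons_self
    have hb : ((t.headD []).length : Int) = (W' : Int) := by rw [headD_length hdims hH]
    rw [List.foldl_cons, hb]
    obtain ⟨hd1, hcell1⟩ := crane_inner H' W' c hc i0 hi0 (PySem.List.pyRange 0 (W' : Int) 1)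
      (fun j hj => PySem.List.mem_pyRange_one.mp hj) t hdims
    obtain ⟨hd2, hcell2⟩ := ih (fun i hi => hir i (List.mem_cons_of_mem _ hi)) _ hd1
    refine ⟨hd2, ?_⟩
    intro p hp
    rw [hcell2 p hp]
    have h0 : aCell ((PySem.List.pyRange 0 (W' : Int) 1).foldl
        (fun t j => if aCell t i0 j = c then aCellSet t i0 j "" else t) t) p.1 p.2
        = if p.1 = i0 ∧ aCell t p.1 p.2 = c then "" else aCell t p.1 p.2 := by
      rw [hcell1 p hp]
      have hpm : p.2 ∈ PySem.List.pyRange 0 (W' : Int) 1 :=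
        PySem.List.mem_pyRange_one.mpr ⟨hp.2.2.1, hp.2.2.2⟩
      by_cases hcond : p.1 = i0 ∧ aCell t p.1 p.2 = c
      · rw [if_pos ⟨hcond.1, hpm, hcond.2⟩, if_pos hcond]
      · rw [if_neg (by rintro ⟨h1, -, h3⟩; exact hcond ⟨h1, h3⟩), if_neg hcond]
    rw [h0]
    by_cases hpe0 : p.1 = i0 ∧ aCell t p.1 p.2 = c
    · rw [if_pos hpe0]
      have hnc : ¬ ("" = c) := fun h => hc h.symm
      rw [if_neg (by rintro ⟨-, h⟩; exact hnc h),
          if_pos ⟨List.mem_cons.mpr (Or.inl hpe0.1), hpe0.2⟩]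
    · rw [if_neg hpe0]
      by_cases hcond : p.1 ∈ ir ∧ aCell t p.1 p.2 = c
      · rw [if_pos hcond, if_pos ⟨List.mem_cons_of_mem _ hcond.1, hcond.2⟩]
      · rw [if_neg hcond, if_neg ?_]
        rintro ⟨hp1, hpc⟩
        rcases List.mem_cons.mp hp1 with hj | hj
        · exact hpe0 ⟨hj, hpc⟩
        · exact hcond ⟨hj, hpc⟩

theorem crane_fold_cell (H' W' : Nat) (t : List (List String)) (c : String) (hc : c ≠ "")
    (ht : TD t H' W') (p : Int × Int) (hp : InbN H' W' p) :
    aCell ((PySem.List.pyRange 0 (t.length : Int) 1).foldl (fun t i =>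
        (PySem.List.pyRange 0 ((t.headD []).length : Int) 1).foldl (fun t j =>
          if aCell t i j = c then aCellSet t i j "" else t) t) t) p.1 p.2
      = if aCell t p.1 p.2 = c then "" else aCell t p.1 p.2 := by
  obtain ⟨hdims, hh, hH, hW⟩ := ht
  have hlen : ((t.length : Nat) : Int) = (H' : Int) := by rw [hdims.1]
  rw [hlen]
  obtain ⟨-, hcell⟩ := crane_outer H' W' c hc hH (PySem.List.pyRange 0 (H' : Int) 1)
    (fun i hi => PySem.List.mem_pyRange_one.mp hi) t hdims
  rw [hcell p hp]
  rw [if_congr (iff_of_eq (by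
    have hpm : p.1 ∈ PySem.List.pyRange 0 (H' : Int) 1 :=
      PySem.List.mem_pyRange_one.mpr ⟨hp.1, hp.2.1⟩
    exact propext ⟨fun h => h.2, fun h => ⟨hpm, h⟩⟩)) rfl rfl]

theorem crane_fold_dims (H' W' : Nat) (t : List (List String)) (c : String) (hc : c ≠ "")
    (ht : TD t H' W') :
    TD ((PySem.List.pyRange 0 (t.length : Int) 1).foldl (fun t i =>
        (PySem.List.pyRange 0 ((t.headD []).length : Int) 1).foldl (fun t j =>
          if aCell t i j = c then aCellSet t i j "" else t) t) t) H' W' := by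
  obtain ⟨hdims, hh, hH, hW⟩ := ht
  have hlen : ((t.length : Nat) : Int) = (H' : Int) := by rw [hdims.1]
  rw [hlen]
  obtain ⟨hd, -⟩ := crane_outer H' W' c hc hH (PySem.List.pyRange 0 (H' : Int) 1)
    (fun i hi => PySem.List.mem_pyRange_one.mp hi) t hdims
  refine ⟨hd, headD_length hd hH, hH, hW⟩

theorem find?_filter_not_val (l : List ((Int × Int) × String)) (c : String) (p : Int × Int)
    (hnd : (l.map (fun e => e.1)).Nodup) :
    List.find? (fun e => e.1 == p) (l.filter (fun kv => kv.2 ≠ c)) =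
      match List.find? (fun e => e.1 == p) l with
      | some v => if v.2 = c then none else some v
      | none => none := by
  induction l with
  | nil => rfl
  | cons a l ih =>
    have hndt : (l.map (fun e => e.1)).Nodup := (List.nodup_cons.mp hnd).2
    have hhead : a.1 ∉ l.map (fun e => e.1) := (List.nodup_cons.mp hnd).1
    rw [List.filter_cons]
    by_cases hac : a.2 = c
    · rw [if_neg (by simp [hac]), ih hndt]
      by_cases hap : (a.1 == p) = true
      · rw [List.find?_cons_of_pos (p := fun e : (Int × Int) × String => e.1 == p) hap]
        have hnone : List.find? (fun e => e.1 == p) l = none := by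
          rw [List.find?_eq_none]
          intro x hx hbeq
          have hap' : a.1 = p := by simpa using hap
          have hxp : x.1 = p := by simpa using hbeq
          exact hhead (List.mem_map.mpr ⟨x, hx, by rw [hxp, hap']⟩)
        rw [hnone]
        simp [hac]
      · rw [List.find?_cons_of_neg (p := fun e : (Int × Int) × String => e.1 == p) (by simpa using hap)]
    · rw [if_pos (by simpa using hac)]
      by_cases hap : (a.1 == p) = true
      · rw [List.find?_cons_of_pos (p := fun e : (Int × Int) × String => e.1 == p) hap, List.find?_cons_of_pos (p := fun e : (Int × Int) × String => e.1 == p) hap]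
        simp [hac]
      · rw [List.find?_cons_of_neg (p := fun e : (Int × Int) × String => e.1 == p) (by simpa using hap),
            List.find?_cons_of_neg (p := fun e : (Int × Int) × String => e.1 == p) (by simpa using hap), ih hndt]

theorem filter_get? (g : PySem.Dict (Int × Int) String) (c : String) (hnd : g.keys.Nodup)
    (p : Int × Int) :
    (PySem.Dict.mk (g.items.filter (fun kv => kv.2 ≠ c))).get? p
      = match g.get? p with
        | some v => if v = c then none else some v
        | none => none := by
  obtain ⟨l⟩ := g
  have hnd' : (l.map (fun e => e.1)).Nodup := by simpa [PySem.Dict.keys] using hnd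
  simp only [PySem.Dict.get?]
  rw [find?_filter_not_val l c p hnd']
  cases List.find? (fun e => e.1 == p) l with
  | none => rfl
  | some a =>
    by_cases hac : a.2 = c <;> simp [hac]

theorem mem_bRemoved (g : PySem.Dict (Int × Int) String) (req : String)
    (reach : PySem.Set (Int × Int)) (x : Int × Int) :
    x ∈ reach.foldl (fun r p =>
        (bNbrs p).foldl (fun r n => if g.get? n = some req then PySem.Set.add r n else r) r)
      PySem.Set.empty ↔
    g.get? x = some req ∧ ∃ p ∈ reach, x ∈ bNbrs p := by
  rw [mem_foldl_acc _ _ (fun p x => g.get? x = some req ∧ x ∈ bNbrs p) ?hstep]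
  · constructor
    · rintro (hx | ⟨p, hp, hc, hnb⟩)
      · exact absurd hx (List.not_mem_nil)
      · exact ⟨hc, p, hp, hnb⟩
    · rintro ⟨hc, p, hp, hnb⟩
      exact Or.inr ⟨p, hp, hc, hnb⟩
  case hstep =>
    intro a p x
    rw [mem_foldl_acc _ _ (fun n x => g.get? n = some req ∧ x = n) ?hstep2]
    · constructor
      · rintro (hx | ⟨n, hn, hc, rfl⟩)
        · exact Or.inl hx
        · exact Or.inr ⟨hc, hn⟩
      · rintro (hx | ⟨hc, hn⟩)
        · exact Or.inl hx
        · exact Or.inr ⟨x, hn, hc, rfl⟩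
    case hstep2 =>
      intro a n x
      split_ifs with hc
      · rw [PySem.Set.mem_add]
        constructor
        · rintro (hx | rfl)
          · exact Or.inl hx
          · exact Or.inr ⟨hc, rfl⟩
        · rintro (hx | ⟨_, rfl⟩)
          · exact Or.inl hx
          · exact Or.inr rfl
      · constructor
        · exact Or.inl
        · rintro (hx | ⟨hc', rfl⟩)
          · exact hx
          · exact absurd hc' hc

theorem step_rel (H' W' : Nat) (t : List (List String)) (g : PySem.Dict (Int × Int) String)
    (req : String) (hrel : GRel H' W' t g) (hreq : req ≠ "") :
    GRel H' W' (aStep t req) (bStep (H' : Int) (W' : Int) g req) := by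
  obtain ⟨ht, hpt, hval, hnd⟩ := hrel
  obtain ⟨hdims, hh, hH, hW⟩ := ht
  have hrel0 : GRel H' W' t g := ⟨⟨hdims, hh, hH, hW⟩, hpt, hval, hnd⟩
  have h00 : InbN H' W' (0, 0) :=
    ⟨le_refl 0, by simp only; exact_mod_cast hH, le_refl 0, by simp only; exact_mod_cast hW⟩
  have hreach_iff : ∀ p, Reach (ECellA t) H' W' p ↔ Reach (EDictB g) H' W' p := by
    intro p
    constructor
    · exact reach_congr (fun q hq => rel_empty_iff hrel0 hq)
    · exact reach_congr (fun q hq => (rel_empty_iff hrel0 hq).symm)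
  by_cases hlen : PySem.Str.len req = 1
  · have haeq : aStep t req = (aBfs t req (t.length * (t.headD []).length + 1) [(0, 0)]
        (aVSet (List.replicate t.length (List.replicate (t.headD []).length (0 : Int))) 0 0)
        PySem.Set.empty).foldl (fun t p => aCellSet t p.1 p.2 "") t := by
      rw [aStep, if_pos hlen]
    have hbeq : bStep (H' : Int) (W' : Int) g req =
        ((bFlood g (H' : Int) (W' : Int) (((H' : Int) * (W' : Int)).toNat + 1)
            (PySem.Set.ofList [(0, 0)])).foldl (fun r p =>
          (bNbrs p).foldl (fun r n => if g.get? n = some req then PySem.Set.add r n else r) r)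
          PySem.Set.empty).foldl (fun g p => g.erase p) g := by
      rw [bStep, if_pos hlen]
    rw [haeq, hbeq]
    have hv0dims : MDims (List.replicate t.length (List.replicate (t.headD []).length (0 : Int))) H' W' := by
      refine ⟨by simpa using hdims.1, ?_⟩
      intro r hr
      rw [List.eq_of_mem_replicate hr]
      simpa using hh
    have hVis00 : Vis (aVSet (List.replicate t.length (List.replicate (t.headD []).length (0 : Int))) 0 0) (0, 0) := by
      rw [Vis, aVGet_mGet, aVSet_mSet, mget_set_self hv0dims h00]
      exact one_ne_zero
    have hVisOnly : ∀ p : Int × Int, InbN H' W' p →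
        Vis (aVSet (List.replicate t.length (List.replicate (t.headD []).length (0 : Int))) 0 0) p →
        p = (0, 0) := by
      intro p hp hvp
      by_contra hne
      rw [Vis, aVGet_mGet, aVSet_mSet,
        mget_set_ne hv0dims h00 ⟨hp.1, hp.2.2.1⟩ (by simpa using hne), mget_replicate] at hvp
      exact hvp rfl
    have hinvA : InvA t H' W' req [(0, 0)]
        (aVSet (List.replicate t.length (List.replicate (t.headD []).length (0 : Int))) 0 0)
        PySem.Set.empty := by
      refine ⟨by rw [aVSet_mSet]; exact mdims_set hv0dims _ _ _, ?_, hVis00, ?_, ?_, ?_⟩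
      · intro p hp
        rw [List.mem_singleton] at hp
        subst hp
        exact ⟨h00, hVis00⟩
      · intro p hp hvp
        rw [hVisOnly p hp hvp]
        exact Reach.base
      · intro p hp hvp hpq
        exact absurd (List.mem_singleton.mpr (hVisOnly p hp hvp)) hpq
      · intro n hn
        exact absurd hn (List.not_mem_nil)
    have hfuelA : ([(0, 0)] : List (Int × Int)).length
        + (unvis H' W' (aVSet (List.replicate t.length (List.replicate (t.headD []).length (0 : Int))) 0 0)).card
        ≤ t.length * (t.headD []).length + 1 := by
      have h1 : (unvis H' W' (aVSet (List.replicate t.length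
          (List.replicate (t.headD []).length (0 : Int))) 0 0)).card ≤ (allF H' W').card :=
        Finset.card_le_card (Finset.filter_subset _ _)
      rw [card_allF] at h1
      have hprod : t.length * (t.headD []).length = H' * W' := by rw [hdims.1, hh]
      simp only [List.length_singleton]
      omega
    have hmemA := fun n => aBfs_mem t H' W' req ⟨hdims, hh, hH, hW⟩ hreq _ _ _ _ hinvA hfuelA n
    have hinvB : InvB g H' W' (PySem.Set.ofList [(0, 0)]) := by
      refine ⟨?_, PySem.Set.nodup_ofList _, ?_⟩
      · rw [PySem.Set.mem_ofList]; exact List.mem_singleton.mpr rfl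
      · intro p hp
        rw [PySem.Set.mem_ofList, List.mem_singleton] at hp
        subst hp
        exact Reach.base
    have hfuelB : ((allF H' W') \ (PySem.Set.ofList [(0, 0)] : PySem.Set (Int × Int)).toFinset).card + 1
        ≤ (((H' : Int) * (W' : Int)).toNat + 1) := by
      have h1 : ((allF H' W') \ (PySem.Set.ofList [((0 : Int), (0 : Int))] : PySem.Set (Int × Int)).toFinset).card
          ≤ (allF H' W').card := Finset.card_le_card (Finset.sdiff_subset)
      rw [card_allF] at h1
      have h2 : ((H' : Int) * (W' : Int)).toNat = H' * W' := by
        omega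
      omega
    have hmemB := fun p => bFlood_mem g H' W' h00 (((H' : Int) * (W' : Int)).toNat + 1)
      (PySem.Set.ofList [(0, 0)]) hinvB hfuelB p
    have hsets : ∀ n, n ∈ aBfs t req (t.length * (t.headD []).length + 1) [(0, 0)]
        (aVSet (List.replicate t.length (List.replicate (t.headD []).length (0 : Int))) 0 0)
        PySem.Set.empty ↔
        n ∈ (bFlood g (H' : Int) (W' : Int) (((H' : Int) * (W' : Int)).toNat + 1)
            (PySem.Set.ofList [(0, 0)])).foldl (fun r p =>
          (bNbrs p).foldl (fun r n => if g.get? n = some req then PySem.Set.add r n else r) r)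
          PySem.Set.empty := by
      intro n
      rw [hmemA n, mem_bRemoved]
      constructor
      · rintro ⟨hnInb, hncell, s, hsR, hnb⟩
        have hget : g.get? n = some req := by
          have h2 := hpt n hnInb
          rw [hncell] at h2
          cases hg : g.get? n with
          | none => rw [hg, Option.getD_none] at h2; exact absurd h2 hreq
          | some v => rw [hg, Option.getD_some] at h2; rw [h2]
        exact ⟨hget, s, (hmemB s).mpr ((hreach_iff s).mp hsR), hnb⟩
      · rintro ⟨hget, s, hs, hnb⟩
        have hmem := PySem.Dict.mem_items_of_get?_eq_some g hget
        have hnInb := (hval _ hmem).1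
        refine ⟨hnInb, ?_, s, (hreach_iff s).mpr ((hmemB s).mp hs), hnb⟩
        rw [hpt n hnInb, hget]
        rfl
    have hlstInb : ∀ x ∈ aBfs t req (t.length * (t.headD []).length + 1) [(0, 0)]
        (aVSet (List.replicate t.length (List.replicate (t.headD []).length (0 : Int))) 0 0)
        PySem.Set.empty, InbN H' W' x := by
      intro x hx
      exact ((hmemA x).mp hx).1
    refine ⟨?_, ?_, ?_, ?_⟩
    · refine ⟨clear_fold_dims H' W' _ t hdims, ?_, hH, hW⟩
      exact headD_length (clear_fold_dims H' W' _ t hdims) hH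
    · intro p hp
      rw [clear_fold_cell H' W' _ t hdims hlstInb p hp, erase_fold_get?]
      split_ifs with h1 h2 h2
      · rfl
      · exact absurd ((hsets p).mp h1) h2
      · exact absurd ((hsets p).mpr h2) h1
      · exact hpt p hp
    · intro kv hkv
      exact hval kv (erase_fold_items _ g kv hkv)
    · exact erase_fold_nodup _ g hnd
  · -- crane request
    have hc : String.singleton ((PySem.Str.pyGet? req 0).getD ' ') ≠ "" := singleton_ne_empty _
    have haeq : aStep t req = (PySem.List.pyRange 0 (t.length : Int) 1).foldl (fun t i =>
        (PySem.List.pyRange 0 ((t.headD []).length : Int) 1).foldl (fun t j =>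
          if aCell t i j = String.singleton ((PySem.Str.pyGet? req 0).getD ' ') then aCellSet t i j "" else t) t) t := by
      rw [aStep, if_neg hlen]
    have hbeq : bStep (H' : Int) (W' : Int) g req =
        PySem.Dict.mk (g.items.filter (fun kv => kv.2 ≠ String.singleton ((PySem.Str.pyGet? req 0).getD ' '))) := by
      rw [bStep, if_neg hlen]
    rw [haeq, hbeq]
    refine ⟨crane_fold_dims H' W' t _ hc ⟨hdims, hh, hH, hW⟩, ?_, ?_, ?_⟩
    · intro p hp
      rw [crane_fold_cell H' W' t _ hc ⟨hdims, hh, hH, hW⟩ p hp, filter_get? g _ hnd p]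
      rw [hpt p hp]
      cases hg : g.get? p with
      | none =>
        simp only [Option.getD_none]
        rw [if_neg (fun h => hc h.symm)]
      | some v =>
        simp only [Option.getD_some]
        by_cases hvc : v = String.singleton ((PySem.Str.pyGet? req 0).getD ' ')
        · rw [if_pos hvc, if_pos hvc]
          rfl
        · rw [if_neg hvc, if_neg hvc]
          rfl
    · intro kv hkv
      exact hval kv (List.mem_of_mem_filter hkv)
    · exact (List.Sublist.map _ List.filter_sublist).nodup (by simpa [PySem.Dict.keys] using hnd)

theorem count_inner (t : List (List String)) (i : Int) :
    ∀ (jr : List Int) (a : Int),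
      jr.foldl (fun a j => if aCell t i j ≠ "" then a + 1 else a) a
        = a + ((jr.filter (fun j => aCell t i j ≠ "")).length : Int) := by
  intro jr
  induction jr with
  | nil => intro a; simp
  | cons j0 jr ih =>
    intro a
    rw [List.foldl_cons, List.filter_cons]
    by_cases h : aCell t i j0 ≠ ""
    · rw [if_pos h, if_pos (by simpa using h), ih, List.length_cons]
      push_cast
      ring
    · rw [if_neg h, if_neg (by simpa using h), ih]

theorem count_outer (t : List (List String)) (W : Int) :
    ∀ (ir : List Int) (a : Int),
      ir.foldl (fun a i => (PySem.List.pyRange 0 W 1).foldl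
          (fun a j => if aCell t i j ≠ "" then a + 1 else a) a) a
        = a + ((ir.flatMap (fun i => ((PySem.List.pyRange 0 W 1).filter
            (fun j => aCell t i j ≠ "")).map (fun j => ((i, j) : Int × Int)))).length : Int) := by
  intro ir
  induction ir with
  | nil => intro a; simp
  | cons i0 ir ih =>
    intro a
    rw [List.foldl_cons, count_inner, ih, List.flatMap_cons, List.length_append, List.length_map]
    push_cast
    ring

theorem count_rel (H' W' : Nat) (t : List (List String)) (g : PySem.Dict (Int × Int) String)
    (hrel : GRel H' W' t g) :
    (PySem.List.pyRange 0 (t.length : Int) 1).foldl (fun a i =>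
      (PySem.List.pyRange 0 ((t.headD []).length : Int) 1).foldl (fun a j =>
        if aCell t i j ≠ "" then a + 1 else a) a) 0 = (g.size : Int) := by
  obtain ⟨⟨hdims, hh, hH, hW⟩, hpt, hval, hnd⟩ := hrel
  have hlen : ((t.length : Nat) : Int) = (H' : Int) := by rw [hdims.1]
  have hwid : (((t.headD []).length : Nat) : Int) = (W' : Int) := by rw [hh]
  rw [hlen, hwid, count_outer, zero_add]
  have hkeys : ∀ p : Int × Int, p ∈ g.keys ↔ (InbN H' W' p ∧ aCell t p.1 p.2 ≠ "") := by
    intro p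
    constructor
    · intro hp
      cases hg : g.get? p with
      | none => exact absurd hp ((PySem.Dict.get?_eq_none_iff_not_mem_keys g p).mp hg)
      | some v =>
        have hmem := PySem.Dict.mem_items_of_get?_eq_some g hg
        have hInb := (hval _ hmem).1
        refine ⟨hInb, ?_⟩
        rw [hpt p hInb, hg]
        exact (hval _ hmem).2
    · rintro ⟨hInb, hcell⟩
      by_contra hnk
      have hg : g.get? p = none := (PySem.Dict.get?_eq_none_iff_not_mem_keys g p).mpr hnk
      rw [hpt p hInb, hg] at hcell
      exact hcell rfl
  set L := (PySem.List.pyRange 0 (H' : Int) 1).flatMap (fun i =>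
    ((PySem.List.pyRange 0 (W' : Int) 1).filter
      (fun j => aCell t i j ≠ "")).map (fun j => ((i, j) : Int × Int))) with hL
  have hmemL : ∀ p : Int × Int, p ∈ L ↔ (InbN H' W' p ∧ aCell t p.1 p.2 ≠ "") := by
    intro p
    rw [hL, List.mem_flatMap]
    constructor
    · rintro ⟨i, hi, hp⟩
      rw [List.mem_map] at hp
      obtain ⟨j, hj, rfl⟩ := hp
      rw [List.mem_filter] at hj
      obtain ⟨hj1, hj2⟩ := hj
      have hi' := PySem.List.mem_pyRange_one.mp hi
      have hj' := PySem.List.mem_pyRange_one.mp hj1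
      exact ⟨⟨hi'.1, hi'.2, hj'.1, hj'.2⟩, by simpa using hj2⟩
    · rintro ⟨hInb, hcell⟩
      refine ⟨p.1, PySem.List.mem_pyRange_one.mpr ⟨hInb.1, hInb.2.1⟩, ?_⟩
      rw [List.mem_map]
      refine ⟨p.2, ?_, rfl⟩
      rw [List.mem_filter]
      exact ⟨PySem.List.mem_pyRange_one.mpr ⟨hInb.2.2.1, hInb.2.2.2⟩, by simpa using hcell⟩
  have hndL : L.Nodup := by
    rw [hL, List.nodup_flatMap]
    constructor
    · intro i hi
      exact (List.Nodup.sublist List.filter_sublist (PySem.List.nodup_pyRange_one _ _)).map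
        (fun a b hab => by simpa using (Prod.mk.injEq .. ▸ hab).2)
    · have hpw := PySem.List.pairwise_lt_pyRange_one (a := 0) (b := (H' : Int))
      refine hpw.imp ?_
      intro i1 i2 h12
      intro x hx1 hx2
      rw [List.mem_map] at hx1 hx2
      obtain ⟨j1, -, rfl⟩ := hx1
      obtain ⟨j2, -, he⟩ := hx2
      have := (Prod.mk.injEq .. ▸ he).1
      omega
  have hperm : L.Perm g.keys := by
    rw [List.perm_ext_iff_of_nodup hndL hnd]
    intro p
    rw [hmemL p, hkeys p]
  have hlenL : L.length = g.keys.length := hperm.length_eq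
  have hsize : g.keys.length = g.size := by
    simp [PySem.Dict.keys, PySem.Dict.size]
  rw [hlenL, hsize]

def rowItems (i : Int) (s : String) : List ((Int × Int) × String) :=
  (PySem.List.enumerate s.toList 0).map (fun jc => ((i + 1, jc.1 + 1), String.singleton jc.2))

theorem g0_items : ∀ (rows : List String) (a : Int) (g : PySem.Dict (Int × Int) String),
    (∀ kv ∈ g.items, kv.1.1 < a + 1) →
    ((PySem.List.enumerate rows a).foldl (fun g is =>
        (PySem.List.enumerate is.2.toList 0).foldl (fun g jc =>
          g.insert (is.1 + 1, jc.1 + 1) (String.singleton jc.2)) g) g).items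
      = g.items ++ (PySem.List.enumerate rows a).flatMap (fun is => rowItems is.1 is.2) := by
  intro rows
  induction rows with
  | nil => intro a g hf; simp [PySem.List.enumerate_nil]
  | cons s rows ih =>
    intro a g hf
    rw [PySem.List.enumerate_cons, List.foldl_cons, List.flatMap_cons]
    have hrow : ((PySem.List.enumerate s.toList 0).foldl (fun g jc =>
        g.insert ((a, s).1 + 1, jc.1 + 1) (String.singleton jc.2)) g).items
        = g.items ++ rowItems a s := by
      rw [rowItems]
      refine PySem.Dict.items_foldl_insert_fresh _ _ _ _ ?_ ?_
      · intro jc hjc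
        by_contra hcon
        rw [Bool.not_eq_false, PySem.Dict.contains_iff_mem_keys] at hcon
        simp only [PySem.Dict.keys, List.mem_map] at hcon
        obtain ⟨kv, hkv, hfst⟩ := hcon
        have := hf kv hkv
        rw [hfst] at this
        simp at this
      · show List.Pairwise (· ≠ ·) _
        refine List.Pairwise.map _ ?_ (PySem.List.pairwise_lt_enumerate s.toList (0 : Int))
        intro p q hpq he
        have := (Prod.mk.injEq .. ▸ he).2
        omega
    rw [ih (a + 1) _ ?_]
    · rw [hrow, List.append_assoc]
    · intro kv hkv
      rw [hrow] at hkv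
      rcases List.mem_append.mp hkv with hkv | hkv
      · have := hf kv hkv
        omega
      · rw [rowItems, List.mem_map] at hkv
        obtain ⟨jc, -, rfl⟩ := hkv
        simp

theorem init_rel (storage : List String) (hne : storage ≠ [])
    (hrect : ∀ s ∈ storage, s.toList.length = (storage.headD "").toList.length) :
    GRel (storage.length + 2) ((storage.headD "").toList.length + 2)
      ([List.replicate ((storage.headD "").toList.length + 2) ""]
        ++ storage.map (fun s => [""] ++ s.toList.map (fun ch => String.singleton ch) ++ [""])
        ++ [List.replicate ((storage.headD "").toList.length + 2) ""])
      ((PySem.List.enumerate storage 0).foldl (fun g is =>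
        (PySem.List.enumerate is.2.toList 0).foldl (fun g jc =>
          g.insert (is.1 + 1, jc.1 + 1) (String.singleton jc.2)) g) PySem.Dict.empty) := by
  have hW2 : ∀ s ∈ storage, s.toList.length = (storage.headD "").toList.length := hrect
  set W2 := (storage.headD "").toList.length with hW2def
  set len := storage.length with hlendef
  set rowOf : String → List String :=
    (fun s => [""] ++ s.toList.map (fun ch => String.singleton ch) ++ [""]) with hrowOf
  set temp : List (List String) :=
    [List.replicate (W2 + 2) ""] ++ storage.map rowOf ++ [List.replicate (W2 + 2) ""] with htemp
  set g0 : PySem.Dict (Int × Int) String :=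
    (PySem.List.enumerate storage 0).foldl (fun g is =>
      (PySem.List.enumerate is.2.toList 0).foldl (fun g jc =>
        g.insert (is.1 + 1, jc.1 + 1) (String.singleton jc.2)) g) PySem.Dict.empty with hg0
  have hlenpos : 0 < len := by
    rw [hlendef]
    exact List.length_pos_of_ne_nil hne
  have hitems : g0.items = (PySem.List.enumerate storage 0).flatMap
      (fun is => rowItems is.1 is.2) := by
    rw [hg0, g0_items storage 0 PySem.Dict.empty (fun kv hkv => absurd hkv (by simp [PySem.Dict.empty]))]
    simp [PySem.Dict.empty]
  have hmemItems : ∀ kv : (Int × Int) × String, kv ∈ g0.items ↔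
      ∃ k : Nat, ∃ hk : k < len, ∃ j : Nat, ∃ hj : j < (storage[k]'hk).toList.length,
        kv = ((((k : Nat) : Int) + 1, ((j : Nat) : Int) + 1),
          String.singleton ((storage[k]'hk).toList[j]'hj)) := by
    intro kv
    rw [hitems, List.mem_flatMap]
    constructor
    · rintro ⟨is, his, hkv⟩
      rw [PySem.List.mem_enumerate_iff] at his
      obtain ⟨k, hk, rfl⟩ := his
      rw [rowItems, List.mem_map] at hkv
      obtain ⟨jc, hjc, rfl⟩ := hkv
      rw [PySem.List.mem_enumerate_iff] at hjc
      obtain ⟨j, hj, rfl⟩ := hjc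
      exact ⟨k, hk, j, hj, by simp⟩
    · rintro ⟨k, hk, j, hj, rfl⟩
      refine ⟨((k : Int), storage[k]'hk), ?_, ?_⟩
      · rw [PySem.List.mem_enumerate_iff]
        exact ⟨k, hk, by simp⟩
      · rw [rowItems, List.mem_map]
        refine ⟨((j : Int), (storage[k]'hk).toList[j]'hj), ?_, by simp⟩
        rw [PySem.List.mem_enumerate_iff]
        exact ⟨j, hj, by simp⟩
  have hrowlen : ∀ (k : Nat) (hk : k < len), (storage[k]'hk).toList.length = W2 := by
    intro k hk
    exact hW2 _ (List.getElem_mem hk)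
  have hndk : g0.keys.Nodup := by
    have hkeq : g0.keys = (PySem.List.enumerate storage 0).flatMap
        (fun is => (PySem.List.enumerate is.2.toList 0).map (fun jc => (is.1 + 1, jc.1 + 1))) := by
      rw [PySem.Dict.keys, hitems, List.map_flatMap]
      congr 1
      funext is
      rw [rowItems, List.map_map]
      rfl
    rw [hkeq, List.nodup_flatMap]
    constructor
    · intro is his
      show List.Pairwise (· ≠ ·) _
      refine List.Pairwise.map _ ?_ (PySem.List.pairwise_lt_enumerate is.2.toList (0 : Int))
      intro p q hpq he
      have := (Prod.mk.injEq .. ▸ he).2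
      omega
    · refine List.Pairwise.imp ?_ (PySem.List.pairwise_lt_enumerate storage (0 : Int))
      intro is1 is2 h12 x hx1 hx2
      rw [List.mem_map] at hx1 hx2
      obtain ⟨j1, -, rfl⟩ := hx1
      obtain ⟨j2, -, he⟩ := hx2
      have := (Prod.mk.injEq .. ▸ he).1
      omega
  have hval : ∀ kv ∈ g0.items, InbN (len + 2) (W2 + 2) kv.1 ∧ kv.2 ≠ "" := by
    intro kv hkv
    obtain ⟨k, hk, j, hj, rfl⟩ := (hmemItems kv).mp hkv
    have hjW : j < W2 := by rw [← hrowlen k hk]; exact hj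
    refine ⟨⟨by simp; omega, by simp; omega, by simp; omega, by simp; omega⟩,
      singleton_ne_empty _⟩
  have htdims : MDims temp (len + 2) (W2 + 2) := by
    constructor
    · rw [htemp]
      simp [hlendef]
    · intro r hr
      rw [htemp] at hr
      rcases List.mem_append.mp hr with hr | hr
      · rcases List.mem_append.mp hr with hr | hr
        · rw [List.mem_singleton] at hr
          rw [hr]
          simp
        · rw [List.mem_map] at hr
          obtain ⟨srow, hs, rfl⟩ := hr
          rw [hrowOf]
          simp [hW2 srow hs]
      · rw [List.mem_singleton] at hr
        rw [hr]
        simp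
  refine ⟨⟨htdims, headD_length htdims (by omega), by omega, by omega⟩, ?_, hval, hndk⟩
  -- pointwise agreement
  have hrow0get : ∀ w : Nat, (List.replicate (W2 + 2) ("" : String)).getD w "" = "" := by
    intro w
    rw [List.getD_eq_getElem?_getD, List.getElem?_replicate]
    split_ifs <;> rfl
  have hrowget : ∀ (s : String), s.toList.length = W2 → ∀ v : Nat, v < W2 + 2 →
      ((rowOf s).getD v "") =
        if 1 ≤ v ∧ v ≤ W2 then String.singleton (s.toList.getD (v - 1) ' ') else "" := by
    intro s hslen v hvv
    match v with
    | 0 =>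
      rw [if_neg (by omega)]
      rfl
    | Nat.succ v' =>
      show (("" :: (s.toList.map (fun ch => String.singleton ch) ++ [""])).getD (v' + 1) "") = _
      rw [List.getD_cons_succ]
      by_cases hv' : v' < W2
      · rw [if_pos (by omega)]
        rw [List.getD_eq_getElem?_getD,
            List.getElem?_append_left (by rw [List.length_map, hslen]; exact hv'),
            List.getElem?_map, List.getElem?_eq_getElem (by rw [hslen]; exact hv')]
        simp only [Option.map_some, Option.getD_some]
        congr 1
        rw [List.getD_eq_getElem _ _ (by rw [hslen]; exact hv')]
        simp
      · rw [if_neg (by omega)]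
        have hv'' : v' = W2 := by omega
        subst hv''
        rw [List.getD_eq_getElem?_getD,
            List.getElem?_append_right (by rw [List.length_map, hslen])]
        simp [hslen]
  have htempget : ∀ u : Nat, u < len + 2 →
      temp.getD u [] = if h : 1 ≤ u ∧ u ≤ len then rowOf (storage[u - 1]'(by omega))
        else List.replicate (W2 + 2) "" := by
    intro u huu
    match u with
    | 0 =>
      rw [dif_neg (by omega)]
      rfl
    | Nat.succ u' =>
      have : temp.getD (u' + 1) [] = (storage.map rowOf ++ [List.replicate (W2 + 2) ""]).getD u' [] := by
        rw [htemp, List.singleton_append]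
        rfl
      rw [this]
      by_cases hu' : u' < len
      · rw [dif_pos (by omega)]
        rw [List.getD_eq_getElem?_getD,
            List.getElem?_append_left (by rw [List.length_map, ← hlendef]; exact hu'),
            List.getElem?_map, List.getElem?_eq_getElem (by rw [← hlendef]; exact hu')]
        simp only [Option.map_some, Option.getD_some]
        congr 1
      · rw [dif_neg (by omega)]
        have hu'' : u' = len := by omega
        subst hu''
        rw [List.getD_eq_getElem?_getD,
            List.getElem?_append_right (by rw [List.length_map, ← hlendef])]
        simp [← hlendef]
  intro p hp
  obtain ⟨hp1, hp2, hp3, hp4⟩ := hp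
  have hu : ((p.1.toNat : Nat) : Int) = p.1 := Int.toNat_of_nonneg hp1
  have hv : ((p.2.toNat : Nat) : Int) = p.2 := Int.toNat_of_nonneg hp3
  have hult : p.1.toNat < len + 2 := by omega
  have hvlt : p.2.toNat < W2 + 2 := by omega
  have hcellrw : aCell temp p.1 p.2 = (temp.getD p.1.toNat []).getD p.2.toNat "" := rfl
  have hkeysiff : ∀ q : Int × Int, q ∈ g0.keys ↔ ∃ kv ∈ g0.items, kv.1 = q := by
    intro q
    rw [PySem.Dict.keys, List.mem_map]
  by_cases hint : 1 ≤ p.1.toNat ∧ p.1.toNat ≤ len ∧ 1 ≤ p.2.toNat ∧ p.2.toNat ≤ W2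
  · -- interior cell
    obtain ⟨hi1, hi2, hi3, hi4⟩ := hint
    have hk : p.1.toNat - 1 < len := by omega
    have hjW : p.2.toNat - 1 < W2 := by omega
    have hj : p.2.toNat - 1 < (storage[p.1.toNat - 1]'hk).toList.length := by
      rw [hrowlen _ hk]; exact hjW
    have hgp : g0.get? p = some (String.singleton ((storage[p.1.toNat - 1]'hk).toList[p.2.toNat - 1]'hj)) := by
      rw [PySem.Dict.get?_eq_some_iff_mem_items g0 _ _ hndk]
      rw [hmemItems]
      refine ⟨p.1.toNat - 1, hk, p.2.toNat - 1, hj, ?_⟩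
      have e1 : ((p.1.toNat - 1 : Nat) : Int) + 1 = p.1 := by omega
      have e2 : ((p.2.toNat - 1 : Nat) : Int) + 1 = p.2 := by omega
      rw [Prod.mk.injEq, Prod.mk.injEq]
      exact ⟨⟨e1.symm, e2.symm⟩, rfl⟩
    rw [hcellrw, hgp, Option.getD_some, htempget _ hult, dif_pos ⟨hi1, hi2⟩,
        hrowget _ (hrowlen _ hk) _ hvlt, if_pos ⟨hi3, hi4⟩]
    congr 1
    rw [List.getD_eq_getElem _ _ hj]
  · -- border cell: empty on both sides
    have hgp : g0.get? p = none := by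
      rw [PySem.Dict.get?_eq_none_iff_not_mem_keys]
      rw [hkeysiff]
      rintro ⟨kv, hkv, hfst⟩
      obtain ⟨k, hkl, j, hjl, rfl⟩ := (hmemItems kv).mp hkv
      have hjW : j < W2 := by rw [← hrowlen k hkl]; exact hjl
      simp only at hfst
      have h1 : p.1 = (k : Int) + 1 := by rw [← hfst]
      have h2 : p.2 = (j : Int) + 1 := by rw [← hfst]
      apply hint
      omega
    rw [hcellrw, hgp, Option.getD_none, htempget _ hult]
    by_cases hrowcase : 1 ≤ p.1.toNat ∧ p.1.toNat ≤ len
    · rw [dif_pos hrowcase]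
      have hk : p.1.toNat - 1 < len := by omega
      rw [hrowget _ (hrowlen _ hk) _ hvlt]
      rw [if_neg (by omega)]
    · rw [dif_neg hrowcase]
      exact hrow0get _

-- ===== VERDICT (by name: the statement is the Claim_ definition above) =====
theorem fold_rel (H' W' : Nat) : ∀ (reqs : List String), (∀ r ∈ reqs, r ≠ "") →
    ∀ (t : List (List String)) (g : PySem.Dict (Int × Int) String), GRel H' W' t g →
    GRel H' W' (reqs.foldl aStep t) (reqs.foldl (bStep (H' : Int) (W' : Int)) g) := by
  intro reqs
  induction reqs with
  | nil => intro _ t g h; exact h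
  | cons r reqs ih =>
    intro hr t g h
    rw [List.foldl_cons, List.foldl_cons]
    exact ih (fun x hx => hr x (List.mem_cons_of_mem _ hx)) _ _
      (step_rel H' W' t g r h (hr r List.mem_cons_self))

theorem solution_spec : Claim_equal_solution := by
  intro storage requests hdom hpre
  obtain ⟨hne, hrect, hreqs⟩ := hpre
  show solution storage requests = solution_alt storage requests
  have hrel0 := init_rel storage hne hrect
  have hrelF := fold_rel (storage.length + 2) ((storage.headD "").toList.length + 2)
    requests hreqs _ _ hrel0
  have hcount := count_rel (storage.length + 2) ((storage.headD "").toList.length + 2) _ _ hrelF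
  refine Eq.trans ?_ (Eq.trans hcount ?_)
  · rfl
  · rw [show ((storage.length + 2 : Nat) : Int) = (storage.length : Int) + 2 from by push_cast; ring,
        show (((storage.headD "").toList.length + 2 : Nat) : Int)
            = ((storage.headD "").toList.length : Int) + 2 from by push_cast; ring]
    rfl
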